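-- pv_equiv track=rewrite | github.com/thechnotom/comp3106_project | Graph.py | convert_population_record
-- ===== SOURCE A (Python) =====
-- def convert_population_record (population_record, num_steps):
--     result = {}
--     species_last_record = {}  # last recorded population for all species
--     # walk through all recorded time steps
--     for step in range(0, num_steps):
--         if (step in population_record):
--             for species in population_record[step]:
--                 species_last_record[species] = population_record[step][species]
--         for species in species_last_record:
--             if (species not in result):
--                 result[species] = {"step" : [], "population" : []}
--             result[species]["step"].append(step)
--             result[species]["population"].append(species_last_record[species])
--     return result
-- ===== SOURCE B (Python) =====
-- def convert_population_record(population_record, num_steps):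
--     # Pass 1: species in order of first appearance, with their first-seen step.
--     order = []
--     first = {}
--     for step in range(num_steps):
--         if step in population_record:
--             for species in population_record[step]:
--                 if species not in first:
--                     first[species] = step
--                     order.append(species)
--     # Pass 2: build each species' series independently, forward-filling.
--     result = {}
--     for species in order:
--         start = first[species]
--         steps = []
--         pops = []
--         value = population_record[start][species]
--         for t in range(start, num_steps):
--             if t in population_record and species in population_record[t]:
--                 value = population_record[t][species]
--             steps.append(t)
--             pops.append(value)
--         result[species] = {"step": steps, "population": pops}
--     return result
-- ===== Notes on version B (the rewrite author's own statement) =====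
-- stated objective: alternative
-- what changed: A interleaves all species in one fused forward pass that mutates a dict-of-dicts at every step; B first collects each species' first-seen step in appearance order, then emits each species' whole {'step','population'} series independently with its own forward-fill loop.
import Mathlib
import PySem

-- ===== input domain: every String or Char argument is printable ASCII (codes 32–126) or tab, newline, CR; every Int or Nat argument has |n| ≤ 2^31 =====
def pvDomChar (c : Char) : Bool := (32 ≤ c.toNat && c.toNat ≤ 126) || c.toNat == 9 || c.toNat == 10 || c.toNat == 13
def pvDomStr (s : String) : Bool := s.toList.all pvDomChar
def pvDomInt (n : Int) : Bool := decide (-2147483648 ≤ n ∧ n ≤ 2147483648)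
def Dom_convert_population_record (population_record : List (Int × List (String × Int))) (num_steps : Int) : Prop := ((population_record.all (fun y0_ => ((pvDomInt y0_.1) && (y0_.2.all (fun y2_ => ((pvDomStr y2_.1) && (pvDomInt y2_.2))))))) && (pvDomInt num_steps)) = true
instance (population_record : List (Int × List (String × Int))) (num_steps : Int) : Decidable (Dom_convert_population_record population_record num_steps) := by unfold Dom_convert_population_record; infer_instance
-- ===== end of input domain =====

-- B replaces A's single fused forward pass (which mutates a dict-of-dicts at every step) by a
-- first-appearance pass followed by an independent forward-fill loop per species; alternative
-- decomposition, same asymptotic cost.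


-- ===== PORT A =====
-- the species_last_record update of one time step
def cprLastStep (pr : PySem.Dict Int (List (String × Int))) (last : PySem.Dict String Int)
    (step : Int) : PySem.Dict String Int :=
  if pr.contains step then
    ((pr.get? step).getD []).foldl
      (fun l e => l.insert e.1 (((PySem.Dict.mk ((pr.get? step).getD [])).get? e.1).getD 0)) last
  else last

-- the result update of one time step (append step and current population for every known species)
def cprResStep (step : Int) (res : PySem.Dict String (PySem.Dict String (List Int)))
    (last : PySem.Dict String Int) : PySem.Dict String (PySem.Dict String (List Int)) :=
  last.items.foldl
    (fun r sp =>
      let r1 := if r.contains sp.1 then r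
                else r.insert sp.1 (PySem.Dict.mk [("step", ([] : List Int)), ("population", [])])
      (r1.modify sp.1 PySem.Dict.empty (fun inner => inner.modify "step" [] (· ++ [step]))).modify
        sp.1 PySem.Dict.empty (fun inner => inner.modify "population" [] (· ++ [sp.2])))
    res

def cprAState (pr : PySem.Dict Int (List (String × Int))) (num_steps : Int) :
    PySem.Dict String (PySem.Dict String (List Int)) × PySem.Dict String Int :=
  (PySem.List.pyRange 0 num_steps 1).foldl
    (fun st step =>
      let last := cprLastStep pr st.2 step
      (cprResStep step st.1 last, last))
    (PySem.Dict.empty, PySem.Dict.empty)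

def convert_population_record (population_record : List (Int × List (String × Int))) (num_steps : Int) :
    List (String × List (String × List Int)) :=
  ((cprAState (PySem.Dict.mk population_record) num_steps).1).items.map (fun p => (p.1, p.2.items))

-- ===== PORT B =====
-- pass 1: species in first-appearance order together with their first-seen step
def cprFirstPass (pr : PySem.Dict Int (List (String × Int))) (num_steps : Int) :
    List String × PySem.Dict String Int :=
  (PySem.List.pyRange 0 num_steps 1).foldl
    (fun (st : List String × PySem.Dict String Int) step =>
      if pr.contains step then
        ((pr.get? step).getD []).foldl
          (fun st2 e =>
            if st2.2.contains e.1 then st2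
            else (st2.1 ++ [e.1], st2.2.insert e.1 step))
          st
      else st)
    ([], PySem.Dict.empty)

-- pass 2 inner loop: one species' series from its first-seen step, forward-filling
def cprSeriesAux (pr : PySem.Dict Int (List (String × Int))) (species : String)
    (start num_steps : Int) : List Int × List Int × Int :=
  (PySem.List.pyRange start num_steps 1).foldl
    (fun (st : List Int × List Int × Int) t =>
      let v := if pr.contains t && (PySem.Dict.mk ((pr.get? t).getD [])).contains species
               then ((PySem.Dict.mk ((pr.get? t).getD [])).get? species).getD 0
               else st.2.2
      (st.1 ++ [t], st.2.1 ++ [v], v))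
    ([], [], ((PySem.Dict.mk ((pr.get? start).getD [])).get? species).getD 0)

def cprSeries (pr : PySem.Dict Int (List (String × Int))) (num_steps : Int) (species : String)
    (start : Int) : List Int × List Int :=
  let st := cprSeriesAux pr species start num_steps
  (st.1, st.2.1)

def convert_population_record_alt (population_record : List (Int × List (String × Int))) (num_steps : Int) :
    List (String × List (String × List Int)) :=
  ((cprFirstPass (PySem.Dict.mk population_record) num_steps).1.foldl
    (fun (r : PySem.Dict String (List (String × List Int))) species =>
      r.insert species
        [("step", (cprSeries (PySem.Dict.mk population_record) num_steps species
            ((cprFirstPass (PySem.Dict.mk population_record) num_steps).2.getD species 0)).1),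
         ("population", (cprSeries (PySem.Dict.mk population_record) num_steps species
            ((cprFirstPass (PySem.Dict.mk population_record) num_steps).2.getD species 0)).2)])
    PySem.Dict.empty).items

-- ===== PRECONDITION & SPEC =====
def Spec_convert_population_record (population_record : List (Int × List (String × Int))) (num_steps : Int) (out : List (String × List (String × List Int))) : Prop := out = convert_population_record_alt population_record num_steps
instance (population_record : List (Int × List (String × Int))) (num_steps : Int) (out : List (String × List (String × List Int))) : Decidable (Spec_convert_population_record population_record num_steps out) := by unfold Spec_convert_population_record; infer_instance

-- ===== CLAIM =====
def Claim_equal_convert_population_record : Prop := ∀ (population_record : List (Int × List (String × Int))) (num_steps : Int), Dom_convert_population_record population_record num_steps → Spec_convert_population_record population_record num_steps (convert_population_record population_record num_steps)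

-- ===== LEMMAS AND PROOFS =====

-- proof-side abbreviations
def cprEnts (pr : PySem.Dict Int (List (String × Int))) (t : Int) : List (String × Int) :=
  (pr.get? t).getD []
def cprVal (pr : PySem.Dict Int (List (String × Int))) (t : Int) (sp : String) : Int :=
  ((PySem.Dict.mk (cprEnts pr t)).get? sp).getD 0
def cprRec (pr : PySem.Dict Int (List (String × Int))) (t : Int) (sp : String) : Bool :=
  pr.contains t && (PySem.Dict.mk (cprEnts pr t)).contains sp
def cprUpd (step v : Int) (inner : PySem.Dict String (List Int)) : PySem.Dict String (List Int) :=
  (inner.modify "step" [] (· ++ [step])).modify "population" [] (· ++ [v])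
def cprD0 : PySem.Dict String (List Int) := PySem.Dict.mk [("step", []), ("population", [])]

lemma cprPyRange_nil {a b : Int} (h : b ≤ a) : PySem.List.pyRange a b 1 = [] := by
  simp [PySem.List.pyRange, show ¬ a < b by omega]

lemma cprSeriesAux_succ (pr : PySem.Dict Int (List (String × Int))) (sp : String)
    (f n : Int) (h : f ≤ n) :
    cprSeriesAux pr sp f (n + 1)
      = ((cprSeriesAux pr sp f n).1 ++ [n],
         (cprSeriesAux pr sp f n).2.1 ++
           [if cprRec pr n sp then cprVal pr n sp else (cprSeriesAux pr sp f n).2.2],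
         if cprRec pr n sp then cprVal pr n sp else (cprSeriesAux pr sp f n).2.2) := by
  unfold cprSeriesAux
  rw [PySem.List.pyRange_one_succ_right h, List.foldl_append]
  simp [cprRec, cprVal, cprEnts]

lemma cprSeriesAux_self (pr : PySem.Dict Int (List (String × Int))) (sp : String) (n : Int) :
    cprSeriesAux pr sp n n = ([], [], cprVal pr n sp) := by
  unfold cprSeriesAux
  rw [cprPyRange_nil le_rfl]
  simp [cprVal, cprEnts]

lemma cprUpd_mk (s v : Int) (S P : List Int) :
    cprUpd s v (PySem.Dict.mk [("step", S), ("population", P)])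
      = PySem.Dict.mk [("step", S ++ [s]), ("population", P ++ [v])] := by
  rfl


def cprFPFold (k0 : Int) (es : List (String × Int)) (st : List String × PySem.Dict String Int) :
    List String × PySem.Dict String Int :=
  es.foldl (fun st2 e => if st2.2.contains e.1 then st2 else (st2.1 ++ [e.1], st2.2.insert e.1 k0)) st

def cprLdFold (g : String → Int) (es : List (String × Int)) (ld : PySem.Dict String Int) :
    PySem.Dict String Int :=
  es.foldl (fun l e => l.insert e.1 (g e.1)) ld

lemma cprInner (k0 : Int) (g : String → Int) :
    ∀ (es : List (String × Int)) (st : List String × PySem.Dict String Int)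
      (ld : PySem.Dict String Int),
      st.1.Nodup → st.2.keys = st.1 → ld.keys = st.1 →
      (∃ newL, (cprFPFold k0 es st).1 = st.1 ++ newL) ∧
      (∀ sp, sp ∈ (cprFPFold k0 es st).1 ↔ sp ∈ st.1 ∨ sp ∈ es.map Prod.fst) ∧
      (cprFPFold k0 es st).1.Nodup ∧
      (cprFPFold k0 es st).2.keys = (cprFPFold k0 es st).1 ∧
      (cprLdFold g es ld).keys = (cprFPFold k0 es st).1 ∧
      (∀ sp, (cprFPFold k0 es st).2.getD sp 0
              = if sp ∈ st.1 ∨ ¬ sp ∈ es.map Prod.fst then st.2.getD sp 0 else k0) ∧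
      (∀ sp, (cprLdFold g es ld).getD sp 0
              = if sp ∈ es.map Prod.fst then g sp else ld.getD sp 0) := by
  intro es
  induction es with
  | nil =>
    intro st ld h1 h2 h3
    refine ⟨⟨[], by simp [cprFPFold]⟩, ?_, ?_, ?_, ?_, ?_, ?_⟩ <;>
      simp [cprFPFold, cprLdFold, h1, h2, h3]
  | cons e es ih =>
    intro st ld h1 h2 h3
    have hstep : ∀ (st' : List String × PySem.Dict String Int),
        cprFPFold k0 (e :: es) st'
          = cprFPFold k0 es (if st'.2.contains e.1 then st'
              else (st'.1 ++ [e.1], st'.2.insert e.1 k0)) := by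
      intro st'; rfl
    have hldstep : cprLdFold g (e :: es) ld = cprLdFold g es (ld.insert e.1 (g e.1)) := rfl
    by_cases hc : st.2.contains e.1 = true
    · -- species e.1 already known
      have he1 : e.1 ∈ st.1 := by
        have := (PySem.Dict.contains_iff_mem_keys st.2 e.1).mp hc
        rwa [h2] at this
      have hldc : ld.contains e.1 = true := by
        rw [PySem.Dict.contains_iff_mem_keys, h3]; exact he1
      have h3' : (ld.insert e.1 (g e.1)).keys = st.1 := by
        rw [PySem.Dict.keys_insert_of_contains _ _ hldc, h3]
      obtain ⟨⟨newL, i1⟩, i2, i3, i4, i5, i6, i7⟩ := ih st (ld.insert e.1 (g e.1)) h1 h2 h3'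
      rw [hstep, hldstep, if_pos hc]
      refine ⟨⟨newL, i1⟩, ?_, i3, i4, i5, ?_, ?_⟩
      · intro sp; rw [i2 sp]; simp only [List.map_cons, List.mem_cons]
        constructor
        · rintro (h | h); exact Or.inl h; exact Or.inr (Or.inr h)
        · rintro (h | h | h)
          · exact Or.inl h
          · exact Or.inl (h ▸ he1)
          · exact Or.inr h
      · intro sp; rw [i6 sp]
        simp only [List.map_cons, List.mem_cons]
        by_cases hse : sp = e.1
        · subst hse; simp [he1]
        · have hiff : (sp = e.1 ∨ sp ∈ List.map Prod.fst es) ↔ sp ∈ List.map Prod.fst es := by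
            tauto
          simp only [hiff]
      · intro sp; rw [i7 sp, PySem.Dict.getD_insert]
        simp only [List.map_cons, List.mem_cons]
        by_cases hse : sp = e.1
        · subst hse; simp
        · have hiff : (sp = e.1 ∨ sp ∈ List.map Prod.fst es) ↔ sp ∈ List.map Prod.fst es := by
            tauto
          simp only [hiff, if_neg hse]
    · -- new species e.1
      have hc' : st.2.contains e.1 = false := by revert hc; cases st.2.contains e.1 <;> simp
      have he1 : ¬ e.1 ∈ st.1 := by
        intro h
        rw [← h2, ← PySem.Dict.contains_iff_mem_keys] at h
        exact hc (by exact h)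
      have hldc : ld.contains e.1 = false := by
        have : ¬ ld.contains e.1 = true := by
          rw [PySem.Dict.contains_iff_mem_keys, h3]; exact he1
        revert this; cases ld.contains e.1 <;> simp
      have h1' : (st.1 ++ [e.1]).Nodup := by
        simp only [List.nodup_append, List.nodup_singleton, h1, true_and]
        intro a ha b hb
        simp only [List.mem_singleton] at hb
        subst hb; exact fun hae => he1 (hae ▸ ha)
      have h2' : (st.2.insert e.1 k0).keys = st.1 ++ [e.1] := by
        rw [PySem.Dict.keys_insert_of_not_contains _ _ hc', h2]
      have h3' : (ld.insert e.1 (g e.1)).keys = st.1 ++ [e.1] := by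
        rw [PySem.Dict.keys_insert_of_not_contains _ _ hldc, h3]
      obtain ⟨⟨newL, i1⟩, i2, i3, i4, i5, i6, i7⟩ :=
        ih (st.1 ++ [e.1], st.2.insert e.1 k0) (ld.insert e.1 (g e.1)) h1' h2' h3'
      rw [hstep, hldstep, if_neg hc]
      refine ⟨⟨e.1 :: newL, by rw [i1]; simp⟩, ?_, i3, i4, i5, ?_, ?_⟩
      · intro sp; rw [i2 sp]; simp only [List.map_cons, List.mem_cons, List.mem_append]
        tauto
      · intro sp; rw [i6 sp, PySem.Dict.getD_insert]
        simp only [List.map_cons, List.mem_cons, List.mem_append]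
        by_cases hse : sp = e.1
        · subst hse; simp [he1]
        · by_cases hm : sp ∈ List.map Prod.fst es <;> by_cases hs1 : sp ∈ st.1 <;>
            simp [hm, hs1, hse]
      · intro sp; rw [i7 sp, PySem.Dict.getD_insert]
        simp only [List.map_cons, List.mem_cons]
        by_cases hse : sp = e.1
        · subst hse; simp
        · have hiff : (sp = e.1 ∨ sp ∈ List.map Prod.fst es) ↔ sp ∈ List.map Prod.fst es := by
            tauto
          simp only [hiff, if_neg hse]


lemma cprResFold (step : Int) :
    ∀ (ks : List String) (c : String → Int) (res : PySem.Dict String (PySem.Dict String (List Int))),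
      ks.Nodup → res.keys.Nodup →
      ((ks.foldl (fun r sp =>
          let r1 := if r.contains sp then r else r.insert sp cprD0
          (r1.modify sp PySem.Dict.empty (fun inner => inner.modify "step" [] (· ++ [step]))).modify
            sp PySem.Dict.empty (fun inner => inner.modify "population" [] (· ++ [c sp]))) res).keys
        = res.keys ++ ks.filter (fun sp => ¬ sp ∈ res.keys)) ∧
      (∀ sp, (ks.foldl (fun r sp =>
          let r1 := if r.contains sp then r else r.insert sp cprD0
          (r1.modify sp PySem.Dict.empty (fun inner => inner.modify "step" [] (· ++ [step]))).modify
            sp PySem.Dict.empty (fun inner => inner.modify "population" [] (· ++ [c sp]))) res).getD sp PySem.Dict.empty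
          = if sp ∈ ks then cprUpd step (c sp) (if sp ∈ res.keys then res.getD sp PySem.Dict.empty else cprD0)
            else res.getD sp PySem.Dict.empty) := by
  intro ks
  induction ks with
  | nil => intro c res _ _; exact ⟨by simp, by intro sp; simp⟩
  | cons x ks ih =>
    intro c res hnd hknd
    have hxks : ¬ x ∈ ks := by simp [List.nodup_cons] at hnd; exact hnd.1
    have hndt : ks.Nodup := by simp [List.nodup_cons] at hnd; exact hnd.2
    -- the state after processing x
    set r1 := if res.contains x then res else res.insert x cprD0 with hr1
    set r3 := (r1.modify x PySem.Dict.empty (fun inner => inner.modify "step" [] (· ++ [step]))).modify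
            x PySem.Dict.empty (fun inner => inner.modify "population" [] (· ++ [c x])) with hr3
    have hfold : ∀ (r : PySem.Dict String (PySem.Dict String (List Int))),
        ((x :: ks).foldl (fun r sp =>
          let r1 := if r.contains sp then r else r.insert sp cprD0
          (r1.modify sp PySem.Dict.empty (fun inner => inner.modify "step" [] (· ++ [step]))).modify
            sp PySem.Dict.empty (fun inner => inner.modify "population" [] (· ++ [c sp]))) r)
        = (ks.foldl (fun r sp =>
          let r1 := if r.contains sp then r else r.insert sp cprD0
          (r1.modify sp PySem.Dict.empty (fun inner => inner.modify "step" [] (· ++ [step]))).modify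
            sp PySem.Dict.empty (fun inner => inner.modify "population" [] (· ++ [c sp])))
          (let r1 := if r.contains x then r else r.insert x cprD0
          (r1.modify x PySem.Dict.empty (fun inner => inner.modify "step" [] (· ++ [step]))).modify
            x PySem.Dict.empty (fun inner => inner.modify "population" [] (· ++ [c x])))) := by
      intro r; rfl
    have hkmod : ∀ (d : PySem.Dict String (PySem.Dict String (List Int))) k f,
        d.contains k = true → (d.modify k PySem.Dict.empty f).keys = d.keys := by
      intro d k f hck
      rw [PySem.Dict.keys_modify, PySem.Dict.keys_insert_of_contains _ _ hck]
    have hcmod : ∀ (d : PySem.Dict String (PySem.Dict String (List Int))) k f,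
        d.contains k = true → (d.modify k PySem.Dict.empty f).contains k = true := by
      intro d k f hck
      rw [PySem.Dict.contains_modify]; simp
    by_cases hx : x ∈ res.keys
    · have hcx : res.contains x = true := (PySem.Dict.contains_iff_mem_keys res x).mpr hx
      have hr1res : r1 = res := by rw [hr1, if_pos hcx]
      have hr3keys : r3.keys = res.keys := by
        rw [hr3, hkmod _ _ _ (hcmod _ _ _ (hr1res ▸ hcx)), hkmod _ _ _ (hr1res ▸ hcx), hr1res]
      have hr3getD : ∀ sp, r3.getD sp PySem.Dict.empty
          = if sp = x then cprUpd step (c x) (res.getD x PySem.Dict.empty)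
            else res.getD sp PySem.Dict.empty := by
        intro sp
        by_cases hsx : sp = x
        · subst hsx
          simp [hr3, hr1res, cprUpd, PySem.Dict.modify, PySem.Dict.getD_insert]
        · simp [hr3, hr1res, PySem.Dict.modify, PySem.Dict.getD_insert, hsx]
      obtain ⟨j1, j2⟩ := ih c r3 hndt (hr3keys ▸ hknd)
      rw [hfold]
      constructor
      · rw [j1, hr3keys]
        have : ks.filter (fun sp => ¬ sp ∈ res.keys)
            = (x :: ks).filter (fun sp => ¬ sp ∈ res.keys) := by
          simp [hx]
        rw [this]
      · intro sp
        rw [j2 sp, hr3keys]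
        by_cases hsx : sp = x
        · subst hsx
          simp [hxks, hx, hr3getD sp]
        · simp only [List.mem_cons, hsx, false_or]
          by_cases hsk : sp ∈ ks <;> simp [hsk, hr3getD sp, hsx]
    · have hcx : res.contains x = false := by
        have : ¬ res.contains x = true := fun h => hx ((PySem.Dict.contains_iff_mem_keys res x).mp h)
        revert this; cases res.contains x <;> simp
      have hr1ins : r1 = res.insert x cprD0 := by rw [hr1, if_neg (by simp [hcx])]
      have hr1keys : r1.keys = res.keys ++ [x] := by
        rw [hr1ins, PySem.Dict.keys_insert_of_not_contains _ _ hcx]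
      have hc1x : r1.contains x = true := by
        rw [hr1ins]; exact PySem.Dict.contains_insert_self res x cprD0
      have hr3keys : r3.keys = res.keys ++ [x] := by
        rw [hr3, hkmod _ _ _ (hcmod _ _ _ hc1x), hkmod _ _ _ hc1x, hr1keys]
      have hr3getD : ∀ sp, r3.getD sp PySem.Dict.empty
          = if sp = x then cprUpd step (c x) cprD0
            else res.getD sp PySem.Dict.empty := by
        intro sp
        by_cases hsx : sp = x
        · subst hsx
          simp [hr3, hr1ins, cprUpd, PySem.Dict.modify, PySem.Dict.getD_insert]
        · simp [hr3, hr1ins, PySem.Dict.modify, PySem.Dict.getD_insert, hsx]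
      have hk3nd : r3.keys.Nodup := by
        rw [hr3keys]
        simp only [List.nodup_append, List.nodup_singleton, hknd, true_and]
        intro a ha b hb
        simp only [List.mem_singleton] at hb
        subst hb; exact fun hae => hx (hae ▸ ha)
      obtain ⟨j1, j2⟩ := ih c r3 hndt hk3nd
      rw [hfold]
      constructor
      · rw [j1, hr3keys]
        have hfc : ks.filter (fun sp => ¬ sp ∈ res.keys ++ [x])
            = ks.filter (fun sp => ¬ sp ∈ res.keys) := by
          apply List.filter_congr
          intro a ha
          have : ¬ a = x := fun h => hxks (h ▸ ha)
          simp [List.mem_append, this]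
        rw [hfc, List.filter_cons]
        simp [hx]
      · intro sp
        rw [j2 sp, hr3keys]
        by_cases hsx : sp = x
        · subst hsx
          simp [hxks, hx, hr3getD sp]
        · simp only [List.mem_cons, hsx, false_or, List.mem_append]
          by_cases hsk : sp ∈ ks <;> simp [hsk, hr3getD sp, hsx]


-- step-shape lemmas tying the ports' folds to the fold helpers above
lemma cprFirstPass_succ (pr : PySem.Dict Int (List (String × Int))) (k : Nat) :
    cprFirstPass pr ((k : Int) + 1)
      = (if pr.contains (k : Int)
         then cprFPFold (k : Int) (cprEnts pr (k : Int)) (cprFirstPass pr (k : Int))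
         else cprFirstPass pr (k : Int)) := by
  unfold cprFirstPass
  rw [PySem.List.pyRange_one_succ_right (by positivity), List.foldl_append]
  rfl

lemma cprLastStep_eq (pr : PySem.Dict Int (List (String × Int))) (last : PySem.Dict String Int)
    (t : Int) :
    cprLastStep pr last t
      = (if pr.contains t then cprLdFold (cprVal pr t) (cprEnts pr t) last else last) := rfl

lemma cprAState_succ (pr : PySem.Dict Int (List (String × Int))) (k : Nat) :
    cprAState pr ((k : Int) + 1)
      = (cprResStep (k : Int) (cprAState pr (k : Int)).1
           (cprLastStep pr (cprAState pr (k : Int)).2 (k : Int)),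
         cprLastStep pr (cprAState pr (k : Int)).2 (k : Int)) := by
  unfold cprAState
  rw [PySem.List.pyRange_one_succ_right (by positivity), List.foldl_append]
  rfl

lemma cprResStep_eq (t : Int) (res : PySem.Dict String (PySem.Dict String (List Int)))
    (last : PySem.Dict String Int) (h : last.keys.Nodup) :
    cprResStep t res last
      = last.keys.foldl (fun r sp =>
          let r1 := if r.contains sp then r else r.insert sp cprD0
          (r1.modify sp PySem.Dict.empty (fun inner => inner.modify "step" [] (· ++ [t]))).modify
            sp PySem.Dict.empty (fun inner => inner.modify "population" [] (· ++ [last.getD sp 0]))) res := by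
  unfold cprResStep
  rw [PySem.Dict.items_eq_map_keys last h 0, List.foldl_map]
  rfl

lemma cprRec_iff (pr : PySem.Dict Int (List (String × Int))) (t : Int) (sp : String)
    (h : pr.contains t = true) :
    cprRec pr t sp = true ↔ sp ∈ (cprEnts pr t).map Prod.fst := by
  unfold cprRec
  rw [h, Bool.true_and]
  simp [PySem.Dict.contains, List.any_eq_true, List.mem_map]

lemma cprRec_false (pr : PySem.Dict Int (List (String × Int))) (t : Int) (sp : String)
    (h : pr.contains t = false) : cprRec pr t sp = false := by
  simp [cprRec, h]

-- main invariant: after the steps 0..k-1, A's state is determined by B's first pass and series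
lemma cprMain (pr : PySem.Dict Int (List (String × Int))) (k : Nat) :
    (cprFirstPass pr (k : Int)).1.Nodup ∧
    (cprFirstPass pr (k : Int)).2.keys = (cprFirstPass pr (k : Int)).1 ∧
    (∀ sp ∈ (cprFirstPass pr (k : Int)).1,
        0 ≤ (cprFirstPass pr (k : Int)).2.getD sp 0 ∧
        (cprFirstPass pr (k : Int)).2.getD sp 0 < (k : Int) ∧
        cprRec pr ((cprFirstPass pr (k : Int)).2.getD sp 0) sp = true) ∧
    (cprAState pr (k : Int)).2.keys = (cprFirstPass pr (k : Int)).1 ∧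
    (∀ sp ∈ (cprFirstPass pr (k : Int)).1,
        (cprAState pr (k : Int)).2.getD sp 0
          = (cprSeriesAux pr sp ((cprFirstPass pr (k : Int)).2.getD sp 0) (k : Int)).2.2) ∧
    (cprAState pr (k : Int)).1.keys = (cprFirstPass pr (k : Int)).1 ∧
    (∀ sp ∈ (cprFirstPass pr (k : Int)).1,
        (cprAState pr (k : Int)).1.getD sp PySem.Dict.empty
          = PySem.Dict.mk
              [("step", (cprSeriesAux pr sp ((cprFirstPass pr (k : Int)).2.getD sp 0) (k : Int)).1),
               ("population", (cprSeriesAux pr sp ((cprFirstPass pr (k : Int)).2.getD sp 0) (k : Int)).2.1)]) := by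
  induction k with
  | zero =>
    have h0 : PySem.List.pyRange 0 ((0:Nat):Int) 1 = [] := by
      rw [Nat.cast_zero]; exact cprPyRange_nil le_rfl
    unfold cprFirstPass cprAState
    rw [h0]
    simp
  | succ k ih =>
    obtain ⟨h1, h2, h3, h4, h5, h6, h7⟩ := ih
    have hcast : ((k+1 : Nat) : Int) = (k : Int) + 1 := by push_cast; ring
    rw [hcast]
    by_cases hck : pr.contains (k : Int) = true
    · -- step k is recorded
      have hFP : cprFirstPass pr ((k:Int)+1)
          = cprFPFold (k:Int) (cprEnts pr (k:Int)) (cprFirstPass pr (k:Int)) := by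
        rw [cprFirstPass_succ, if_pos hck]
      have hLS : cprLastStep pr (cprAState pr (k:Int)).2 (k:Int)
          = cprLdFold (cprVal pr (k:Int)) (cprEnts pr (k:Int)) (cprAState pr (k:Int)).2 := by
        rw [cprLastStep_eq, if_pos hck]
      have hAS : cprAState pr ((k:Int)+1)
          = (cprResStep (k:Int) (cprAState pr (k:Int)).1
               (cprLdFold (cprVal pr (k:Int)) (cprEnts pr (k:Int)) (cprAState pr (k:Int)).2),
             cprLdFold (cprVal pr (k:Int)) (cprEnts pr (k:Int)) (cprAState pr (k:Int)).2) := by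
        rw [cprAState_succ, hLS]
      obtain ⟨⟨newL, iNew⟩, iMem, iNd, iKeys, iLdKeys, iFst, iLd⟩ :=
        cprInner (k:Int) (cprVal pr (k:Int)) (cprEnts pr (k:Int))
          (cprFirstPass pr (k:Int)) (cprAState pr (k:Int)).2 h1 h2 h4
      -- the new first dict values
      have hfst : ∀ sp ∈ (cprFirstPass pr (k:Int)).1,
          (cprFPFold (k:Int) (cprEnts pr (k:Int)) (cprFirstPass pr (k:Int))).2.getD sp 0
            = (cprFirstPass pr (k:Int)).2.getD sp 0 := by
        intro sp hm; rw [iFst sp, if_pos (Or.inl hm)]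
      have hfstNew : ∀ sp, ¬ sp ∈ (cprFirstPass pr (k:Int)).1 →
          sp ∈ (cprEnts pr (k:Int)).map Prod.fst →
          (cprFPFold (k:Int) (cprEnts pr (k:Int)) (cprFirstPass pr (k:Int))).2.getD sp 0 = (k:Int) := by
        intro sp hm he; rw [iFst sp, if_neg (by simp [hm, he])]
      -- the new carry values
      have hcarry : ∀ sp ∈ (cprFPFold (k:Int) (cprEnts pr (k:Int)) (cprFirstPass pr (k:Int))).1,
          (cprLdFold (cprVal pr (k:Int)) (cprEnts pr (k:Int)) (cprAState pr (k:Int)).2).getD sp 0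
            = (cprSeriesAux pr sp
                ((cprFPFold (k:Int) (cprEnts pr (k:Int)) (cprFirstPass pr (k:Int))).2.getD sp 0)
                ((k:Int)+1)).2.2 := by
        intro sp hm
        by_cases hmem : sp ∈ (cprFirstPass pr (k:Int)).1
        · have hle : (cprFirstPass pr (k:Int)).2.getD sp 0 ≤ (k:Int) :=
            le_of_lt (h3 sp hmem).2.1
          rw [hfst sp hmem, cprSeriesAux_succ pr sp _ _ hle, iLd sp]
          by_cases hrec : sp ∈ (cprEnts pr (k:Int)).map Prod.fst
          · rw [if_pos hrec, if_pos ((cprRec_iff pr (k:Int) sp hck).mpr hrec)]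
          · have : cprRec pr (k:Int) sp ≠ true :=
              fun h => hrec ((cprRec_iff pr (k:Int) sp hck).mp h)
            rw [if_neg hrec, if_neg this, h5 sp hmem]
        · have hrec : sp ∈ (cprEnts pr (k:Int)).map Prod.fst :=
            ((iMem sp).mp hm).resolve_left hmem
          rw [hfstNew sp hmem hrec, cprSeriesAux_succ pr sp _ _ le_rfl, cprSeriesAux_self,
            iLd sp, if_pos hrec]
          rw [if_pos ((cprRec_iff pr (k:Int) sp hck).mpr hrec)]
      -- result fold characterisation
      have hlknd : (cprLdFold (cprVal pr (k:Int)) (cprEnts pr (k:Int)) (cprAState pr (k:Int)).2).keys.Nodup := by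
        rw [iLdKeys]; exact iNd
      have hres := cprResStep_eq (k:Int) (cprAState pr (k:Int)).1
        (cprLdFold (cprVal pr (k:Int)) (cprEnts pr (k:Int)) (cprAState pr (k:Int)).2) hlknd
      obtain ⟨jK, jV⟩ := cprResFold (k:Int)
        (cprLdFold (cprVal pr (k:Int)) (cprEnts pr (k:Int)) (cprAState pr (k:Int)).2).keys
        (fun sp => (cprLdFold (cprVal pr (k:Int)) (cprEnts pr (k:Int)) (cprAState pr (k:Int)).2).getD sp 0)
        (cprAState pr (k:Int)).1 hlknd (by rw [h6]; exact h1)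
      have hdisj : ∀ sp ∈ newL, ¬ sp ∈ (cprFirstPass pr (k:Int)).1 := by
        have hnd2 := iNew ▸ iNd
        rw [List.nodup_append] at hnd2
        intro sp hsp hsp'
        exact (hnd2.2.2 sp hsp' sp hsp) rfl
      have hRKeys : (cprResStep (k:Int) (cprAState pr (k:Int)).1
            (cprLdFold (cprVal pr (k:Int)) (cprEnts pr (k:Int)) (cprAState pr (k:Int)).2)).keys
          = (cprFPFold (k:Int) (cprEnts pr (k:Int)) (cprFirstPass pr (k:Int))).1 := by
        rw [hres]
        refine jK.trans ?_
        rw [h6, iLdKeys, iNew, List.filter_append]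
        have hf1 : (cprFirstPass pr (k:Int)).1.filter
            (fun sp => ¬ sp ∈ (cprFirstPass pr (k:Int)).1) = [] := by
          simp [List.filter_eq_nil_iff]
        have hf2 : newL.filter (fun sp => ¬ sp ∈ (cprFirstPass pr (k:Int)).1) = newL := by
          rw [List.filter_eq_self]
          intro a ha; simp [hdisj a ha]
        rw [hf1, hf2]; simp
      rw [hFP, hAS]
      refine ⟨iNd, iKeys, ?_, iLdKeys, hcarry, hRKeys, ?_⟩
      · -- first-seen step bounds
        intro sp hm
        by_cases hmem : sp ∈ (cprFirstPass pr (k:Int)).1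
        · obtain ⟨b1, b2, b3⟩ := h3 sp hmem
          rw [hfst sp hmem]
          exact ⟨b1, by omega, b3⟩
        · have hrec : sp ∈ (cprEnts pr (k:Int)).map Prod.fst :=
            ((iMem sp).mp hm).resolve_left hmem
          rw [hfstNew sp hmem hrec]
          refine ⟨by positivity, by omega, (cprRec_iff pr (k:Int) sp hck).mpr hrec⟩
      · -- result values
        intro sp hm
        rw [hres]
        refine (jV sp).trans ?_
        rw [if_pos (by rw [iLdKeys]; exact hm)]
        by_cases hmem : sp ∈ (cprFirstPass pr (k:Int)).1
        · have hle : (cprFirstPass pr (k:Int)).2.getD sp 0 ≤ (k:Int) :=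
            le_of_lt (h3 sp hmem).2.1
          rw [if_pos (by rw [h6]; exact hmem), h7 sp hmem, cprUpd_mk,
            hfst sp hmem, cprSeriesAux_succ pr sp _ _ hle]
          have hc := hcarry sp hm
          rw [hfst sp hmem, cprSeriesAux_succ pr sp _ _ hle] at hc
          rw [hc]
        · have hrec : sp ∈ (cprEnts pr (k:Int)).map Prod.fst :=
            ((iMem sp).mp hm).resolve_left hmem
          rw [if_neg (by rw [h6]; exact hmem)]
          have hc := hcarry sp hm
          rw [hfstNew sp hmem hrec] at hc ⊢
          rw [cprSeriesAux_succ pr sp _ _ le_rfl, cprSeriesAux_self] at hc ⊢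
          show cprUpd (k:Int) _ cprD0 = _
          rw [cprD0, cprUpd_mk, hc]
    · -- step k is not recorded
      have hckf : pr.contains (k:Int) = false := by
        revert hck; cases pr.contains (k:Int) <;> simp
      have hFP : cprFirstPass pr ((k:Int)+1) = cprFirstPass pr (k:Int) := by
        rw [cprFirstPass_succ, if_neg hck]
      have hLS : cprLastStep pr (cprAState pr (k:Int)).2 (k:Int) = (cprAState pr (k:Int)).2 := by
        rw [cprLastStep_eq, if_neg hck]
      have hAS : cprAState pr ((k:Int)+1)
          = (cprResStep (k:Int) (cprAState pr (k:Int)).1 (cprAState pr (k:Int)).2,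
             (cprAState pr (k:Int)).2) := by
        rw [cprAState_succ, hLS]
      have hknd : (cprAState pr (k:Int)).2.keys.Nodup := by rw [h4]; exact h1
      have hres := cprResStep_eq (k:Int) (cprAState pr (k:Int)).1 (cprAState pr (k:Int)).2 hknd
      obtain ⟨jK, jV⟩ := cprResFold (k:Int) (cprAState pr (k:Int)).2.keys
        (fun sp => (cprAState pr (k:Int)).2.getD sp 0)
        (cprAState pr (k:Int)).1 hknd (by rw [h6]; exact h1)
      have hseries : ∀ sp ∈ (cprFirstPass pr (k:Int)).1,
          cprSeriesAux pr sp ((cprFirstPass pr (k:Int)).2.getD sp 0) ((k:Int)+1)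
            = ((cprSeriesAux pr sp ((cprFirstPass pr (k:Int)).2.getD sp 0) (k:Int)).1 ++ [(k:Int)],
               (cprSeriesAux pr sp ((cprFirstPass pr (k:Int)).2.getD sp 0) (k:Int)).2.1 ++
                 [(cprSeriesAux pr sp ((cprFirstPass pr (k:Int)).2.getD sp 0) (k:Int)).2.2],
               (cprSeriesAux pr sp ((cprFirstPass pr (k:Int)).2.getD sp 0) (k:Int)).2.2) := by
        intro sp hm
        have hle : (cprFirstPass pr (k:Int)).2.getD sp 0 ≤ (k:Int) :=
          le_of_lt (h3 sp hm).2.1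
        rw [cprSeriesAux_succ pr sp _ _ hle, cprRec_false pr (k:Int) sp hckf]
        simp
      rw [hFP, hAS]
      refine ⟨h1, h2, ?_, h4, ?_, ?_, ?_⟩
      · intro sp hm
        obtain ⟨b1, b2, b3⟩ := h3 sp hm
        exact ⟨b1, by omega, b3⟩
      · intro sp hm
        rw [hseries sp hm, h5 sp hm]
      · rw [hres]
        refine jK.trans ?_
        rw [h6, h4]
        have : (cprFirstPass pr (k:Int)).1.filter
            (fun sp => ¬ sp ∈ (cprFirstPass pr (k:Int)).1) = [] := by
          simp [List.filter_eq_nil_iff]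
        rw [this, List.append_nil]
      · intro sp hm
        rw [hres]
        refine (jV sp).trans ?_
        rw [if_pos (by rw [h4]; exact hm), if_pos (by rw [h6]; exact hm),
          h7 sp hm, cprUpd_mk, hseries sp hm, h5 sp hm]

-- ===== VERDICT =====
lemma cprAlt_eq (pr0 : List (Int × List (String × Int))) (n : Int)
    (h : (cprFirstPass (PySem.Dict.mk pr0) n).1.Nodup) :
    convert_population_record_alt pr0 n
      = (cprFirstPass (PySem.Dict.mk pr0) n).1.map
          (fun sp =>
            (sp, [("step", (cprSeries (PySem.Dict.mk pr0) n sp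
                    ((cprFirstPass (PySem.Dict.mk pr0) n).2.getD sp 0)).1),
                  ("population", (cprSeries (PySem.Dict.mk pr0) n sp
                    ((cprFirstPass (PySem.Dict.mk pr0) n).2.getD sp 0)).2)])) := by
  unfold convert_population_record_alt
  rw [PySem.Dict.items_foldl_insert_fresh _ _ _ _ (fun a _ => rfl) (by simpa using h)]
  rfl

theorem convert_population_record_spec : Claim_equal_convert_population_record := by
  intro pr0 n hdom
  unfold Spec_convert_population_record
  by_cases hn : 0 ≤ n
  · obtain ⟨k, rfl⟩ : ∃ k : Nat, n = (k : Int) := ⟨n.toNat, (Int.toNat_of_nonneg hn).symm⟩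
    obtain ⟨h1, h2, h3, h4, h5, h6, h7⟩ := cprMain (PySem.Dict.mk pr0) k
    rw [cprAlt_eq pr0 (k : Int) h1]
    unfold convert_population_record
    rw [PySem.Dict.items_eq_map_keys _ (by rw [h6]; exact h1) PySem.Dict.empty, h6,
      List.map_map]
    apply List.map_congr_left
    intro sp hm
    have := h7 sp hm
    simp only [Function.comp]
    rw [this]
    rfl
  · have hnil : PySem.List.pyRange 0 n 1 = [] := cprPyRange_nil (by omega)
    unfold convert_population_record convert_population_record_alt cprAState cprFirstPass
    rw [hnil]
    rfl
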